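-- pv_equiv track=rewrite | github.com/balrok/adventofcode | carl/adventofcode21.py | buy_all
-- ===== SOURCE A (Python) =====
-- items  = {
-- "Weapons": ((8,4,0),
-- (10,    5,      0),
-- (25,    6,      0),
-- (40,    7,      0),
-- (74,    8,      0)
-- ),
-- "Armor":(
-- (0,    0,      0), # additional because we can buy nothing
-- ( 13,    0,      1),
-- ( 31,    0,      2),
-- ( 53,    0,      3),
-- ( 75,    0,      4),
-- (102,    0,      5)
-- ),
-- "Rings":(
-- # price, dmg, def
-- (0,    0,      0), # additional because we can buy nothing
-- (0,    0,      0), # additional because we can buy nothing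
-- ( 20,    0,      1),
-- ( 25,    1,      0),
-- ( 40,    0,      2),
-- ( 50,    2,      0),
-- ( 80,    0,      3),
-- (100,    3,      0)
-- )}
--
-- def buy_all(base_money):
--     for w in items["Weapons"]:
--         equip1 = [0, 0]
--         money1 = base_money
--         if w[0] > money1:
--             break
--         money1 -= w[0]
--         equip1[0] += w[1]
--         equip1[1] += w[2]
--         for a in items["Armor"]:
--             equip2 = equip1[:]
--             money2 = money1
--             if a[0] > money2:
--                 break
--             money2 -= a[0]
--             equip2[0] += a[1]
--             equip2[1] += a[2]
--             for r1_num in range(len(items["Rings"])):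
--                 equip3 = equip2[:]
--                 money3 = money2
--                 r1 = items["Rings"][r1_num]
--                 if r1[0] > money3:
--                     break
--                 money3 -= r1[0]
--                 equip3[0] += r1[1]
--                 equip3[1] += r1[2]
--                 for r2_num in range(r1_num+1, len(items["Rings"])):
--                     equip4 = equip3[:]
--                     money4 = money3
--                     r2 = items["Rings"][r2_num]
--                     if r2[0] > money4:
--                         break
--                     money4 -= r2[0]
--                     equip4[0] += r2[1]
--                     equip4[1] += r2[2]
--                     yield((equip4, money4, [w[0], a[0], r1[0], r2[0]]))
-- ===== SOURCE B (Python) =====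
-- items  = {
-- "Weapons": ((8,4,0),
-- (10,    5,      0),
-- (25,    6,      0),
-- (40,    7,      0),
-- (74,    8,      0)
-- ),
-- "Armor":(
-- (0,    0,      0), # additional because we can buy nothing
-- ( 13,    0,      1),
-- ( 31,    0,      2),
-- ( 53,    0,      3),
-- ( 75,    0,      4),
-- (102,    0,      5)
-- ),
-- "Rings":(
-- # price, dmg, def
-- (0,    0,      0), # additional because we can buy nothing
-- (0,    0,      0), # additional because we can buy nothing
-- ( 20,    0,      1),
-- ( 25,    1,      0),
-- ( 40,    0,      2),
-- ( 50,    2,      0),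
-- ( 80,    0,      3),
-- (100,    3,      0)
-- )}
--
-- def buy_all(base_money):
--     # precompute every ordered ring pair once: (cost, dmg, def, price1, price2)
--     rest = list(items["Rings"])
--     pairs = []
--     while rest:
--         r1 = rest.pop(0)
--         for r2 in rest:
--             pairs.append((r1[0] + r2[0], r1[1] + r2[1], r1[2] + r2[2], r1[0], r2[0]))
--     for w in items["Weapons"]:
--         for a in items["Armor"]:
--             for p in pairs:
--                 cost = w[0] + a[0] + p[0]
--                 if cost <= base_money:
--                     yield ([w[1] + a[1] + p[1], w[2] + a[2] + p[2]],
--                            base_money - cost,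
--                            [w[0], a[0], p[3], p[4]])
-- ===== Notes on version B (the rewrite author's own statement) =====
-- stated objective: simpler
-- what changed: B precomputes all ordered ring-pair combinations once into a table and replaces A's staged budget/equipment bookkeeping and price-sorted break pruning with a single total-price filter per (weapon, armor, pair) choice.
import Mathlib
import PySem

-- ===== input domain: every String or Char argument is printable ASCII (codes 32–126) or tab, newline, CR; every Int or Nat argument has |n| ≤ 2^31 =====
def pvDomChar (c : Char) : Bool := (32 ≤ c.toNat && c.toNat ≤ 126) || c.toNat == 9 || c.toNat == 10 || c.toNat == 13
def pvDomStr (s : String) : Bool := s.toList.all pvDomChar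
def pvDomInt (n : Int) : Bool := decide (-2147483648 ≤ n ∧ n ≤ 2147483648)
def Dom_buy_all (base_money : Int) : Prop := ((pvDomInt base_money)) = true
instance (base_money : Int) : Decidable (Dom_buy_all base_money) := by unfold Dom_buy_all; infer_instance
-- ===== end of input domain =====

-- B replaces A's staged budget bookkeeping and price-sorted 'break' pruning by a precomputed
-- ring-pair table and one total-price filter (objective: simpler; return-value equivalence,
-- A is a generator consumed as a list).

-- ===== PORT A =====
def pvWeapons : List (Int × Int × Int) := [(8,4,0),(10,5,0),(25,6,0),(40,7,0),(74,8,0)]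
def pvArmor : List (Int × Int × Int) := [(0,0,0),(13,0,1),(31,0,2),(53,0,3),(75,0,4),(102,0,5)]
def pvRings : List (Int × Int × Int) := [(0,0,0),(0,0,0),(20,0,1),(25,1,0),(40,0,2),(50,2,0),(80,0,3),(100,3,0)]

-- innermost r2 loop (break on r2[0] > money3)
def pvLoopR2 (money3 e3d e3f wp ap r1p : Int) : List (Int × Int × Int) → List (List Int × Int × List Int)
  | [] => []
  | r2 :: rest =>
    if r2.1 > money3 then []
    else ([e3d + r2.2.1, e3f + r2.2.2], money3 - r2.1, [wp, ap, r1p, r2.1]) :: pvLoopR2 money3 e3d e3f wp ap r1p rest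

-- r1 loop over indices, r2 ranges over the tail after r1 (break on r1[0] > money2)
def pvLoopR1 (money2 e2d e2f wp ap : Int) : List (Int × Int × Int) → List (List Int × Int × List Int)
  | [] => []
  | r1 :: rest =>
    if r1.1 > money2 then []
    else pvLoopR2 (money2 - r1.1) (e2d + r1.2.1) (e2f + r1.2.2) wp ap r1.1 rest ++
         pvLoopR1 money2 e2d e2f wp ap rest

-- armor loop (break on a[0] > money1)
def pvLoopA (money1 e1d e1f wp : Int) : List (Int × Int × Int) → List (List Int × Int × List Int)
  | [] => []
  | a :: rest =>
    if a.1 > money1 then []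
    else pvLoopR1 (money1 - a.1) (e1d + a.2.1) (e1f + a.2.2) wp a.1 pvRings ++
         pvLoopA money1 e1d e1f wp rest

-- weapon loop (break on w[0] > base_money)
def pvLoopW (base_money : Int) : List (Int × Int × Int) → List (List Int × Int × List Int)
  | [] => []
  | w :: rest =>
    if w.1 > base_money then []
    else pvLoopA (base_money - w.1) w.2.1 w.2.2 w.1 pvArmor ++ pvLoopW base_money rest

def buy_all (base_money : Int) : List (List Int × Int × List Int) :=
  pvLoopW base_money pvWeapons

-- ===== PORT B =====
-- while rest: r1 = rest.pop(0); for r2 in rest: append (cost, dmg, def, price1, price2)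
def pvMkPairs : List (Int × Int × Int) → List (Int × Int × Int × Int × Int)
  | [] => []
  | r1 :: rest =>
    rest.map (fun r2 => (r1.1 + r2.1, r1.2.1 + r2.2.1, r1.2.2 + r2.2.2, r1.1, r2.1)) ++ pvMkPairs rest

def buy_all_alt (base_money : Int) : List (List Int × Int × List Int) :=
  pvWeapons.flatMap (fun w =>
    pvArmor.flatMap (fun a =>
      (pvMkPairs pvRings).flatMap (fun p =>
        if w.1 + a.1 + p.1 ≤ base_money then
          [([w.2.1 + a.2.1 + p.2.1, w.2.2 + a.2.2 + p.2.2.1],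
            base_money - (w.1 + a.1 + p.1),
            [w.1, a.1, p.2.2.2.1, p.2.2.2.2])]
        else [])))

-- ===== PRECONDITION & SPEC =====
def Spec_buy_all (base_money : Int) (out : List (List Int × Int × List Int)) : Prop := out = buy_all_alt base_money
instance (base_money : Int) (out : List (List Int × Int × List Int)) : Decidable (Spec_buy_all base_money out) := by unfold Spec_buy_all; infer_instance

-- ===== CLAIM (what is proved, stated in full; the proofs are below) =====
def Claim_equal_buy_all : Prop := ∀ (base_money : Int), Dom_buy_all base_money → Spec_buy_all base_money (buy_all base_money)

-- ===== LEMMAS AND PROOFS =====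

-- prices ascending
def pvAsc (l : List (Int × Int × Int)) : Prop := List.Pairwise (fun x y => x.1 ≤ y.1) l
-- prices nonnegative
def pvNonneg (l : List (Int × Int × Int)) : Prop := ∀ x ∈ l, 0 ≤ x.1

theorem pvFlatMap_congr {α β : Type} (l : List α) (f g : α → List β)
    (h : ∀ x ∈ l, f x = g x) : l.flatMap f = l.flatMap g := by
  induction l with
  | nil => rfl
  | cons x xs ih =>
    simp only [List.flatMap_cons, h x (by simp), ih (fun y hy => h y (by simp [hy]))]

theorem pvFlatMap_nil {α β : Type} (l : List α) (f : α → List β)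
    (h : ∀ x ∈ l, f x = []) : l.flatMap f = [] := by
  simp only [List.flatMap_eq_nil_iff]; exact h

-- every pair built from rs costs at least as much as some element of rs
theorem pvMkPairs_lb (rs : List (Int × Int × Int)) (hn : pvNonneg rs) :
    ∀ p ∈ pvMkPairs rs, ∃ x ∈ rs, x.1 ≤ p.1 := by
  induction rs with
  | nil => simp [pvMkPairs]
  | cons r1 rest ih =>
    intro p hp
    simp only [pvMkPairs, List.mem_append, List.mem_map] at hp
    rcases hp with ⟨r2, hr2, rfl⟩ | hp
    · exact ⟨r1, by simp, by have := hn r2 (by simp [hr2]); simp; omega⟩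
    · obtain ⟨x, hx, hle⟩ := ih (fun y hy => hn y (by simp [hy])) p hp
      exact ⟨x, by simp [hx], hle⟩

-- the r2 loop equals a filter over the remaining rings
theorem pvLoopR2_eq (money3 e3d e3f wp ap r1p : Int) (rest : List (Int × Int × Int))
    (hs : pvAsc rest) :
    pvLoopR2 money3 e3d e3f wp ap r1p rest =
      rest.flatMap (fun r2 =>
        if r2.1 ≤ money3 then [([e3d + r2.2.1, e3f + r2.2.2], money3 - r2.1, [wp, ap, r1p, r2.1])]
        else []) := by
  induction rest with
  | nil => rfl
  | cons r2 rest ih =>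
    rw [pvAsc, List.pairwise_cons] at hs
    simp only [pvLoopR2, List.flatMap_cons]
    by_cases h : r2.1 > money3
    · rw [if_pos h, if_neg (by omega), List.nil_append, pvFlatMap_nil]
      intro x hx
      rw [if_neg (by have := hs.1 x hx; omega)]
    · rw [if_neg h, if_pos (by omega), ih hs.2, List.singleton_append]

-- the r1 loop equals a filter over the pairs built from the remaining rings
theorem pvLoopR1_eq (money2 e2d e2f wp ap : Int) (rs : List (Int × Int × Int))
    (hs : pvAsc rs) (hn : pvNonneg rs) :
    pvLoopR1 money2 e2d e2f wp ap rs =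
      (pvMkPairs rs).flatMap (fun p =>
        if p.1 ≤ money2 then
          [([e2d + p.2.1, e2f + p.2.2.1], money2 - p.1, [wp, ap, p.2.2.2.1, p.2.2.2.2])]
        else []) := by
  induction rs with
  | nil => rfl
  | cons r1 rest ih =>
    rw [pvAsc, List.pairwise_cons] at hs
    have hnr : pvNonneg rest := fun y hy => hn y (by simp [hy])
    simp only [pvLoopR1, pvMkPairs, List.flatMap_append, List.flatMap_map]
    by_cases h : r1.1 > money2
    · rw [if_pos h, pvFlatMap_nil, pvFlatMap_nil, List.append_nil]
      · intro p hp
        obtain ⟨x, hx, hle⟩ := pvMkPairs_lb rest hnr p hp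
        rw [if_neg (by have := hs.1 x hx; omega)]
      · intro r2 hr2
        rw [if_neg (by have := hn r2 (by simp [hr2]); simp; omega)]
    · rw [if_neg h, ih hs.2 hnr, pvLoopR2_eq _ _ _ _ _ _ _ hs.2]
      congr 1
      apply pvFlatMap_congr
      intro r2 _
      by_cases hc : r2.1 ≤ money2 - r1.1
      · rw [if_pos hc, if_pos (by omega)]
        simp [Int.add_assoc, Int.sub_sub]
      · rw [if_neg hc, if_neg (by omega)]

-- the armor loop equals B's armor-level flatMap
theorem pvLoopA_eq (money1 e1d e1f wp : Int) (as : List (Int × Int × Int))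
    (hs : pvAsc as) (hn : pvNonneg as) :
    pvLoopA money1 e1d e1f wp as =
      as.flatMap (fun a =>
        (pvMkPairs pvRings).flatMap (fun p =>
          if a.1 + p.1 ≤ money1 then
            [([e1d + a.2.1 + p.2.1, e1f + a.2.2 + p.2.2.1],
              money1 - (a.1 + p.1), [wp, a.1, p.2.2.2.1, p.2.2.2.2])]
          else [])) := by
  have hrs : pvAsc pvRings := by unfold pvAsc pvRings; decide
  have hrn : pvNonneg pvRings := by unfold pvNonneg pvRings; decide
  have hplb : ∀ p ∈ pvMkPairs pvRings, 0 ≤ p.1 := by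
    intro p hp
    obtain ⟨x, hx, hle⟩ := pvMkPairs_lb pvRings hrn p hp
    have := hrn x hx; omega
  induction as with
  | nil => rfl
  | cons a rest ih =>
    rw [pvAsc, List.pairwise_cons] at hs
    simp only [pvLoopA, List.flatMap_cons]
    by_cases h : a.1 > money1
    · rw [if_pos h, pvFlatMap_nil, List.nil_append, pvFlatMap_nil]
      · intro a' ha'
        apply pvFlatMap_nil
        intro p hp
        rw [if_neg (by have := hs.1 a' ha'; have := hplb p hp; omega)]
      · intro p hp
        rw [if_neg (by have := hplb p hp; omega)]
    · rw [if_neg h, ih hs.2 (fun y hy => hn y (by simp [hy])),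
        pvLoopR1_eq _ _ _ _ _ _ hrs hrn]
      congr 1
      apply pvFlatMap_congr
      intro p _
      by_cases hc : p.1 ≤ money1 - a.1
      · rw [if_pos hc, if_pos (by omega)]
        simp [Int.sub_sub, Int.add_assoc]
      · rw [if_neg hc, if_neg (by omega)]

-- the weapon loop equals B's whole flatMap
theorem pvLoopW_eq (base_money : Int) (ws : List (Int × Int × Int))
    (hs : pvAsc ws) (hn : pvNonneg ws) :
    pvLoopW base_money ws =
      ws.flatMap (fun w =>
        pvArmor.flatMap (fun a =>
          (pvMkPairs pvRings).flatMap (fun p =>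
            if w.1 + a.1 + p.1 ≤ base_money then
              [([w.2.1 + a.2.1 + p.2.1, w.2.2 + a.2.2 + p.2.2.1],
                base_money - (w.1 + a.1 + p.1),
                [w.1, a.1, p.2.2.2.1, p.2.2.2.2])]
            else []))) := by
  have has : pvAsc pvArmor := by unfold pvAsc pvArmor; decide
  have han : pvNonneg pvArmor := by unfold pvNonneg pvArmor; decide
  have hrn : pvNonneg pvRings := by unfold pvNonneg pvRings; decide
  have hplb : ∀ p ∈ pvMkPairs pvRings, 0 ≤ p.1 := by
    intro p hp
    obtain ⟨x, hx, hle⟩ := pvMkPairs_lb pvRings hrn p hp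
    have := hrn x hx; omega
  induction ws with
  | nil => rfl
  | cons w rest ih =>
    rw [pvAsc, List.pairwise_cons] at hs
    simp only [pvLoopW, List.flatMap_cons]
    by_cases h : w.1 > base_money
    · rw [if_pos h, pvFlatMap_nil, List.nil_append, pvFlatMap_nil]
      · intro w' hw'
        apply pvFlatMap_nil
        intro a ha
        apply pvFlatMap_nil
        intro p hp
        rw [if_neg (by have := hs.1 w' hw'; have := han a ha; have := hplb p hp; omega)]
      · intro a ha
        apply pvFlatMap_nil
        intro p hp
        rw [if_neg (by have := han a ha; have := hplb p hp; omega)]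
    · rw [if_neg h, ih hs.2 (fun y hy => hn y (by simp [hy])),
        pvLoopA_eq _ _ _ _ _ has han]
      congr 1
      apply pvFlatMap_congr
      intro a _
      apply pvFlatMap_congr
      intro p _
      by_cases hc : a.1 + p.1 ≤ base_money - w.1
      · rw [if_pos hc, if_pos (by omega)]
        simp [Int.sub_sub, Int.add_assoc]
      · rw [if_neg hc, if_neg (by omega)]

-- ===== VERDICT (by name: the statement is the Claim_ definition above) =====
theorem buy_all_spec : Claim_equal_buy_all := by
  intro base_money _
  unfold Spec_buy_all buy_all buy_all_alt
  exact pvLoopW_eq base_money pvWeapons (by unfold pvAsc pvWeapons; decide)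
    (by unfold pvNonneg pvWeapons; decide)
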